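-- pv_equiv track=rewrite | github.com/ashish-kamboj/Python | Code and Programs/numbers_which_are_arithmetic_mean_of_adjacent_numbers.py | countArithmeticMeans
-- ===== SOURCE A (Python) =====
-- def countArithmeticMeans(a):
--     """
--     Used to find the count of numbers which are arithmetic mean of their adjacent numbers
--
--     Parameters
--     ----------
--         list
--             List of numbers to check for arithmetic mean
--     Returns
--     -------
--         int
--             count of numbers which are arithmetic mean
--     """
--
--     count = 0
--
--     if(len(a) != 1):
--         for idx, num in enumerate(a):
--             if(idx == 0):
--                 # If it is a first element of list
--                 if(a[idx + 1] == 2 * a[idx]):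
--                     count = count + 1
--             elif(idx == len(a)-1):
--                 # If it is the last element of list
--                 if(a[idx - 1] == 2 * a[idx]):
--                     count = count + 1
--             elif(a[idx - 1] + a[idx + 1] == 2 * a[idx]):
--                 count = count + 1
--             else:
--                 continue
--         return count
--     elif(len(a) == 1 and a[0] == 0):
--         return count + 1
--     else:
--         return count
-- ===== SOURCE B (Python) =====
-- def countArithmeticMeans(a):
--     # Work on the discrete derivative: an element is the arithmetic mean of its
--     # neighbours (missing neighbours read as 0, matching A's edge/singleton rules)
--     # exactly when the first-difference sequence of the zero-padded list is locally
--     # constant there; so build the difference list and count equal adjacent pairs.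
--     pad = [0] + list(a) + [0]
--     d = [y - x for x, y in zip(pad, pad[1:])]
--     return sum(u == v for u, v in zip(d, d[1:]))
-- ===== Notes on version B (the rewrite author's own statement) =====
-- stated objective: alternative
-- what changed: Instead of A's indexed loop with three-way first/last/middle branching and len==0/len==1 special-cased returns, B computes the first-difference (discrete derivative) sequence of the zero-padded list and counts adjacent equal pairs in it, i.e. plateaus of the derivative.
import Mathlib
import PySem

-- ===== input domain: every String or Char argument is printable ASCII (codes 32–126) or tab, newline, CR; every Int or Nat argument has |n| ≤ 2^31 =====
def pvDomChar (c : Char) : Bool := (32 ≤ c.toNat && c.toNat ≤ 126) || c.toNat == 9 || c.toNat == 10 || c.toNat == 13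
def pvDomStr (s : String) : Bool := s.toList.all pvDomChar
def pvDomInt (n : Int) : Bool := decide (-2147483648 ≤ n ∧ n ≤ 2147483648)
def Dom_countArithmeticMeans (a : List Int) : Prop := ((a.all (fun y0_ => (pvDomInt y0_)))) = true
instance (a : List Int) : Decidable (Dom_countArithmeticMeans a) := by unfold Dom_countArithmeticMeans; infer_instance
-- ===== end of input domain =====

-- B replaces A's indexed loop with first/last/middle branching and singleton/empty special cases
-- by computing the first-difference sequence of the zero-padded list and counting adjacent equal
-- pairs in it (objective: alternative formulation via the discrete derivative).

-- ===== PORT A =====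
-- a[idx±1]/a[idx] are in range on every branch Python reaches, so the 0 default of pyGetD is never used.
def countArithmeticMeans (a : List Int) : Int :=
  if a.length ≠ 1 then
    (PySem.List.enumerate a 0).foldl (fun count p =>
      if p.1 = 0 then
        if PySem.List.pyGetD a (p.1 + 1) 0 = 2 * PySem.List.pyGetD a p.1 0 then count + 1 else count
      else if p.1 = (a.length : Int) - 1 then
        if PySem.List.pyGetD a (p.1 - 1) 0 = 2 * PySem.List.pyGetD a p.1 0 then count + 1 else count
      else if PySem.List.pyGetD a (p.1 - 1) 0 + PySem.List.pyGetD a (p.1 + 1) 0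
                = 2 * PySem.List.pyGetD a p.1 0 then count + 1 else count) 0
  else if a.length = 1 ∧ PySem.List.pyGetD a 0 0 = 0 then 0 + 1
  else 0

-- ===== PORT B =====
-- pad = [0] + a + [0]; d = pairwise differences (zip pad pad[1:]); result = number of
-- adjacent equal pairs in d (Python's sum of booleans over zip(d, d[1:])).
def countArithmeticMeans_alt (a : List Int) : Int :=
  let pad : List Int := 0 :: (a ++ [0])
  let d : List Int := (pad.zip pad.tail).map (fun p => p.2 - p.1)
  (d.zip d.tail).foldl (fun s p => s + (if p.1 = p.2 then 1 else 0)) 0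

-- ===== PRECONDITION & SPEC =====
def Spec_countArithmeticMeans (a : List Int) (out : Int) : Prop := out = countArithmeticMeans_alt a
instance (a : List Int) (out : Int) : Decidable (Spec_countArithmeticMeans a out) := by unfold Spec_countArithmeticMeans; infer_instance

-- ===== CLAIM =====
def Claim_equal_countArithmeticMeans : Prop := ∀ (a : List Int), Dom_countArithmeticMeans a → Spec_countArithmeticMeans a (countArithmeticMeans a)

-- ===== LEMMAS AND PROOFS =====

-- proof-only intermediate: the count expressed as an index fold over the padded list
def paddedCount (a : List Int) : Int :=
  let pad : List Int := 0 :: (a ++ [0])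
  (List.range a.length).foldl
    (fun s i => if pad.getD i 0 + pad.getD (i + 2) 0 = 2 * pad.getD (i + 1) 0 then s + 1 else s) 0

theorem countArithmeticMeans_singleton (x : Int) :
    countArithmeticMeans [x] = paddedCount [x] := by
  simp [countArithmeticMeans, paddedCount, List.range_succ, PySem.List.pyGetD]

-- pointwise agreement of A's per-index condition with the padded condition
theorem cond_agree (a : List Int) (h1 : a.length ≠ 1) (k : Nat) (hk : k < a.length) :
    ((if (k : Int) = 0 then
        (PySem.List.pyGetD a ((k : Int) + 1) 0 = 2 * PySem.List.pyGetD a (k : Int) 0)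
      else if (k : Int) = (a.length : Int) - 1 then
        (PySem.List.pyGetD a ((k : Int) - 1) 0 = 2 * PySem.List.pyGetD a (k : Int) 0)
      else (PySem.List.pyGetD a ((k : Int) - 1) 0 + PySem.List.pyGetD a ((k : Int) + 1) 0
              = 2 * PySem.List.pyGetD a (k : Int) 0)) ↔
     ((0 :: (a ++ [0])).getD k 0 + (0 :: (a ++ [0])).getD (k + 2) 0
        = 2 * (0 :: (a ++ [0])).getD (k + 1) 0)) := by
  have hn2 : 2 ≤ a.length := by omega
  have hget : ∀ j : Nat, PySem.List.pyGetD a ((j : Nat) : Int) 0 = a.getD j 0 :=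
    fun j => PySem.List.pyGetD_natCast a j 0
  have hpad1 : ∀ j : Nat, j < a.length → (0 :: (a ++ [0])).getD (j + 1) 0 = a.getD j 0 := by
    intro j hj
    simp [List.getD, List.getElem?_append_left hj]
  by_cases hk0 : k = 0
  · subst hk0
    have h2 : (0 :: (a ++ [0])).getD 2 0 = a.getD 1 0 := hpad1 1 (by omega)
    have e1 : PySem.List.pyGetD a (((0:Nat) : Int) + 1) 0 = a.getD 1 0 := by
      rw [show ((0:Nat):Int) + 1 = ((1:Nat):Int) by omega, hget]
    rw [if_pos (by omega : ((0:Nat):Int) = 0), e1, hget 0]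
    have hpad0 : (0 :: (a ++ [0])).getD 0 0 = 0 := rfl
    rw [show (0:Nat) + 2 = 2 from rfl, h2, hpad1 0 hk, hpad0]
    constructor <;> intro h <;> omega
  · have hkI : ¬ ((k : Int) = 0) := by omega
    have hm1 : PySem.List.pyGetD a ((k : Int) - 1) 0 = a.getD (k - 1) 0 := by
      have e : (k : Int) - 1 = ((k - 1 : Nat) : Int) := by omega
      rw [e, hget]
    have hpadk : (0 :: (a ++ [0])).getD k 0 = a.getD (k - 1) 0 := by
      obtain ⟨k', rfl⟩ : ∃ k', k = k' + 1 := ⟨k - 1, by omega⟩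
      simp [List.getD, List.getElem?_append_left (by omega : k' < a.length)]
    by_cases hlast : k = a.length - 1
    · have hkL : ((k : Int) = (a.length : Int) - 1) := by omega
      have hpad2 : (0 :: (a ++ [0])).getD (k + 2) 0 = 0 := by
        have hk1 : k + 1 = a.length := by omega
        simp [List.getD, hk1]
      rw [if_neg hkI, if_pos hkL, hpad2, hpad1 k hk, hpadk, hm1, hget k]
      constructor <;> intro h <;> omega
    · have hkL : ¬ ((k : Int) = (a.length : Int) - 1) := by omega
      have hp1 : PySem.List.pyGetD a ((k : Int) + 1) 0 = a.getD (k + 1) 0 := by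
        have e : (k : Int) + 1 = ((k + 1 : Nat) : Int) := by omega
        rw [e, hget]
      have hpad2 : (0 :: (a ++ [0])).getD (k + 2) 0 = a.getD (k + 1) 0 :=
        hpad1 (k + 1) (by omega)
      rw [if_neg hkI, if_neg hkL, hpad1 k hk, hpadk, hpad2, hm1, hp1, hget k]

-- A's per-index step (definitionally the body of A's fold)
def stepA (a : List Int) (count : Int) (i : Int) : Int :=
  if i = 0 then
    if PySem.List.pyGetD a (i + 1) 0 = 2 * PySem.List.pyGetD a i 0 then count + 1 else count
  else if i = (a.length : Int) - 1 then
    if PySem.List.pyGetD a (i - 1) 0 = 2 * PySem.List.pyGetD a i 0 then count + 1 else count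
  else if PySem.List.pyGetD a (i - 1) 0 + PySem.List.pyGetD a (i + 1) 0
            = 2 * PySem.List.pyGetD a i 0 then count + 1 else count

theorem countArithmeticMeans_ne_one (a : List Int) (h1 : a.length ≠ 1) :
    countArithmeticMeans a = paddedCount a := by
  have hB : paddedCount a = (List.range a.length).foldl
      (fun s i => if (0 :: (a ++ [0])).getD i 0 + (0 :: (a ++ [0])).getD (i + 2) 0
          = 2 * (0 :: (a ++ [0])).getD (i + 1) 0 then s + 1 else s) 0 := rfl
  rw [hB]
  show (if a.length ≠ 1 then (PySem.List.enumerate a 0).foldl (fun c p => stepA a c p.1) 0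
        else if a.length = 1 ∧ PySem.List.pyGetD a 0 0 = 0 then 0 + 1 else 0) = _
  rw [if_pos h1]
  have e1 : (PySem.List.enumerate a 0).foldl (fun c p => stepA a c p.1) 0
      = ((PySem.List.enumerate a 0).map (fun p => p.1)).foldl (stepA a) 0 :=
    List.foldl_map.symm
  rw [e1, PySem.List.map_fst_enumerate]
  rw [show PySem.List.pyRange 0 (0 + (a.length : Int)) 1
        = (List.range a.length).map (fun k => ((k : Nat) : Int)) from by
      rw [PySem.List.pyRange_one]; simp]
  rw [List.foldl_map]
  apply PySem.List.foldl_congr_mem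
  intro s k hkmem
  have hk : k < a.length := List.mem_range.mp hkmem
  have hiff := cond_agree a h1 k hk
  simp only [stepA]
  by_cases hc : (0 :: (a ++ [0])).getD k 0 + (0 :: (a ++ [0])).getD (k + 2) 0
      = 2 * (0 :: (a ++ [0])).getD (k + 1) 0
  · rw [if_pos hc]
    have hA := hiff.mpr hc
    split_ifs at hA ⊢ <;> tauto
  · rw [if_neg hc]
    have hA : ¬ _ := fun h => hc (hiff.mp h)
    split_ifs at hA ⊢ <;> tauto

-- B's zip-of-differences pairs, expressed by index over the padded list
theorem alt_pairs_eq (a : List Int) :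
    (let pad : List Int := 0 :: (a ++ [0])
     let d : List Int := (pad.zip pad.tail).map (fun p => p.2 - p.1)
     d.zip d.tail)
    = (List.range a.length).map (fun i =>
        ((0 :: (a ++ [0])).getD (i + 1) 0 - (0 :: (a ++ [0])).getD i 0,
         (0 :: (a ++ [0])).getD (i + 2) 0 - (0 :: (a ++ [0])).getD (i + 1) 0)) := by
  set pad : List Int := 0 :: (a ++ [0]) with hpad
  have hpadlen : pad.length = a.length + 2 := by simp [hpad]
  apply List.ext_getElem
  · simp [List.length_zip, hpadlen]
  · intro i h1 h2
    have hi : i < a.length := by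
      have := h1
      simp [List.length_zip, hpadlen] at this
      omega
    simp only [List.getElem_zip, List.getElem_tail, List.getElem_map, List.getElem_range]
    have g : ∀ j, ∀ (h : j < pad.length), pad.getD j 0 = pad[j] :=
      fun j h => List.getD_eq_getElem _ _ h
    rw [g i (by omega), g (i + 1) (by omega), g (i + 2) (by omega)]

theorem alt_eq_paddedCount (a : List Int) :
    countArithmeticMeans_alt a = paddedCount a := by
  show (let pad : List Int := 0 :: (a ++ [0])
        let d : List Int := (pad.zip pad.tail).map (fun p => p.2 - p.1)
        d.zip d.tail).foldl (fun s p => s + (if p.1 = p.2 then 1 else 0)) 0 = _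
  rw [alt_pairs_eq a, List.foldl_map]
  unfold paddedCount
  apply PySem.List.foldl_congr_mem
  intro s i _
  by_cases hc : (0 :: (a ++ [0])).getD (i + 1) 0 - (0 :: (a ++ [0])).getD i 0
      = (0 :: (a ++ [0])).getD (i + 2) 0 - (0 :: (a ++ [0])).getD (i + 1) 0
  · rw [if_pos hc, if_pos (by omega)]
  · rw [if_neg hc, if_neg (by omega)]; omega

-- ===== VERDICT =====
theorem countArithmeticMeans_spec : Claim_equal_countArithmeticMeans := by
  intro a _
  unfold Spec_countArithmeticMeans
  rw [alt_eq_paddedCount]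
  by_cases h1 : a.length = 1
  · obtain ⟨x, hx⟩ : ∃ x, a = [x] := by
      match a, h1 with
      | [x], _ => exact ⟨x, rfl⟩
    rw [hx]
    exact countArithmeticMeans_singleton x
  · exact countArithmeticMeans_ne_one a h1
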